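-- pv_equiv track=rewrite | github.com/yucaho/BPD | ble-profile-inspector/src/ble_profile_inspector/compare.py | _secondary_name_matches
-- ===== SOURCE A (Python) =====
-- from typing import Any
--
-- def _name(d: dict[str, Any]) -> str:
--     return d.get("local_name") or d.get("device_name") or ""
--
-- def _secondary_name_matches(removed: list[dict[str, Any]], added: list[dict[str, Any]]) -> list[dict[str, Any]]:
--     out = []
--     for r in removed:
--         rn = _name(r).strip().lower()
--         if not rn:
--             continue
--         for a in added:
--             if rn and rn == _name(a).strip().lower():
--                 out.append({"removed_address": r.get("address"), "added_address": a.get("address"), "name": rn})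
--     return out
-- ===== SOURCE B (Python) =====
-- def _name(d):
--     return d.get("local_name") or d.get("device_name") or ""
--
--
-- def _secondary_name_matches(removed, added):
--     # Index added entries by normalized name once, then one lookup per removed.
--     index = {}
--     for a in added:
--         an = _name(a).strip().lower()
--         if an:
--             index.setdefault(an, []).append(a.get("address"))
--     out = []
--     for r in removed:
--         rn = _name(r).strip().lower()
--         if not rn:
--             continue
--         for aa in index.get(rn, []):
--             out.append({"removed_address": r.get("address"), "added_address": aa, "name": rn})
--     return out
-- ===== Notes on version B (the rewrite author's own statement) =====
-- stated objective: alternative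
-- what changed: B builds a dict mapping normalized added-name to the list of added addresses in one pass, then does one hash lookup per removed entry, replacing A's inner scan of added for every removed entry.
import Mathlib
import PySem

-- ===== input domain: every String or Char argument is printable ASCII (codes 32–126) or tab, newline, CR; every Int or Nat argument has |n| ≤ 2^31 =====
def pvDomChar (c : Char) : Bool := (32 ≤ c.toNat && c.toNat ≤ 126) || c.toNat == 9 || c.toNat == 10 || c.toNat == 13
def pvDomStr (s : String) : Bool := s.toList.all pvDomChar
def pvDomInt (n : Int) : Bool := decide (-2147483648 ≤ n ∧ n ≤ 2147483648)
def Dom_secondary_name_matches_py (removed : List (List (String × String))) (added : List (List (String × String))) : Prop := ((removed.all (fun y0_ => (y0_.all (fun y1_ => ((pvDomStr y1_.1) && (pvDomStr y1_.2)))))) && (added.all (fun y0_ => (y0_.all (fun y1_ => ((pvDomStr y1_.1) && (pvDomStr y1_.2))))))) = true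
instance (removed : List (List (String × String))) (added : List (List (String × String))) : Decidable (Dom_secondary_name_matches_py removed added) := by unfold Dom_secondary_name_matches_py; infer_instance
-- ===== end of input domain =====

-- B replaces A's inner scan over `added` by a dict of added addresses keyed by
-- normalized name, built once (objective: alternative single-index algorithm).
-- Pre_ excludes inputs whose Python result would contain a None address
-- (not a value of the declared String type).

-- ===== PORT A =====
-- _name(d).strip().lower(); `or` returns the first truthy (nonempty) string
def pvNorm (d : List (String × String)) : String :=
  let l := (PySem.Dict.mk d).getD "local_name" ""
  let n := if l == "" then (PySem.Dict.mk d).getD "device_name" "" else l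
  PySem.Str.lower (PySem.Str.strip n)

-- d.get("address"); the "" default is only reached outside Pre_ (Python has None there)
def pvAddr (d : List (String × String)) : String :=
  (PySem.Dict.mk d).getD "address" ""

def pvEntry (r : List (String × String)) (aa rn : String) : List (String × String) :=
  [("removed_address", pvAddr r), ("added_address", aa), ("name", rn)]

def secondary_name_matches_py (removed : List (List (String × String))) (added : List (List (String × String))) : List (List (String × String)) :=
  removed.foldl (fun out r =>
    let rn := pvNorm r
    if rn == "" then out
    else added.foldl (fun out2 a =>
      if (!(rn == "")) && (rn == pvNorm a) then out2 ++ [pvEntry r (pvAddr a) rn]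
      else out2) out) []

-- ===== PORT B =====
-- index[an] = index.get(an, []) + [a.get("address")]
def pvIndex (added : List (List (String × String))) : PySem.Dict String (List String) :=
  added.foldl (fun idx a =>
    let an := pvNorm a
    if an == "" then idx
    else idx.modify an [] (· ++ [pvAddr a])) PySem.Dict.empty

def secondary_name_matches_py_alt (removed : List (List (String × String))) (added : List (List (String × String))) : List (List (String × String)) :=
  let idx := pvIndex added
  removed.foldl (fun out r =>
    let rn := pvNorm r
    if rn == "" then out
    else (idx.getD rn []).foldl (fun out2 aa => out2 ++ [pvEntry r aa rn]) out) []

-- ===== PRECONDITION & SPEC =====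
-- Pre_ excludes exactly the inputs on which Python A's result contains None
-- (a matched removed/added pair lacking an "address" key): there A's value is
-- not of the declared List (String × String) dict type.
def Pre_secondary_name_matches_py (removed : List (List (String × String))) (added : List (List (String × String))) : Prop :=
  ∀ r ∈ removed, ∀ a ∈ added,
    pvNorm r ≠ "" → pvNorm r = pvNorm a →
      ((PySem.Dict.mk r).contains "address" = true ∧ (PySem.Dict.mk a).contains "address" = true)
instance (removed : List (List (String × String))) (added : List (List (String × String))) : Decidable (Pre_secondary_name_matches_py removed added) := by unfold Pre_secondary_name_matches_py; infer_instance

def pvWitness_secondary_name_matches_py : (List (List (String × String))) × (List (List (String × String))) :=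
  ([[("local_name", " Foo"), ("address", "aa:bb")]],
   [[("device_name", "foo "), ("address", "cc:dd")], [("local_name", "bar")]])

def Spec_secondary_name_matches_py (removed : List (List (String × String))) (added : List (List (String × String))) (out : List (List (String × String))) : Prop := out = secondary_name_matches_py_alt removed added
instance (removed : List (List (String × String))) (added : List (List (String × String))) (out : List (List (String × String))) : Decidable (Spec_secondary_name_matches_py removed added out) := by unfold Spec_secondary_name_matches_py; infer_instance

-- ===== CLAIM (what is proved, stated in full; the proofs are below) =====
def Claim_equal_secondary_name_matches_py : Prop := ∀ (removed : List (List (String × String))) (added : List (List (String × String))), Dom_secondary_name_matches_py removed added → Pre_secondary_name_matches_py removed added → Spec_secondary_name_matches_py removed added (secondary_name_matches_py removed added)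

-- ===== LEMMAS AND PROOFS =====

-- the index lookup returns exactly the addresses of the added entries whose
-- normalized name equals rn (for nonempty rn), in order
theorem pvIndex_getD (added : List (List (String × String)))
    (d : PySem.Dict String (List String)) (rn : String) (h : rn ≠ "") :
    (added.foldl (fun idx a =>
      let an := pvNorm a
      if an == "" then idx
      else idx.modify an [] (· ++ [pvAddr a])) d).getD rn []
    = d.getD rn [] ++ (added.filter (fun a => rn == pvNorm a)).map pvAddr := by
  induction added generalizing d with
  | nil => simp
  | cons a rest ih =>
    rw [List.foldl_cons, ih, List.filter_cons]
    by_cases he : (pvNorm a == "") = true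
    · have hne : (rn == pvNorm a) = false := by
        simp only [beq_iff_eq] at he ⊢
        simp only [beq_eq_false_iff_ne, ne_eq]
        intro hr; exact h (hr.trans he)
      simp [he, hne]
    · simp only [he, Bool.false_eq_true, if_false]
      rw [PySem.Dict.getD_modify]
      by_cases hm : rn = pvNorm a
      · simp [hm]
      · have hm' : (rn == pvNorm a) = false := by simpa using hm
        simp [hm, hm']

theorem pvInner_eq (added : List (List (String × String)))
    (r : List (String × String)) (out : List (List (String × String)))
    (h : ¬ pvNorm r == "") :
    added.foldl (fun out2 a =>
      if (!(pvNorm r == "")) && (pvNorm r == pvNorm a) then out2 ++ [pvEntry r (pvAddr a) (pvNorm r)]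
      else out2) out
    = ((pvIndex added).getD (pvNorm r) []).foldl
        (fun out2 aa => out2 ++ [pvEntry r aa (pvNorm r)]) out := by
  have hrn : pvNorm r ≠ "" := by simpa using h
  rw [show pvIndex added = (added.foldl (fun idx a =>
        let an := pvNorm a
        if an == "" then idx
        else idx.modify an [] (· ++ [pvAddr a])) PySem.Dict.empty) from rfl,
      pvIndex_getD added _ _ hrn]
  simp only [PySem.Dict.getD_empty, List.nil_append]
  rw [PySem.List.foldl_append_if (fun a => (!(pvNorm r == "")) && (pvNorm r == pvNorm a))
        (fun a => pvEntry r (pvAddr a) (pvNorm r)),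
      PySem.List.foldl_append_singleton_eq_map]
  simp [h, List.map_map, Function.comp]

-- ===== VERDICT (by name: the statement is the Claim_ definition above) =====
set_option maxHeartbeats 1000000 in
theorem secondary_name_matches_py_spec : Claim_equal_secondary_name_matches_py := by
  intro removed added _ _
  show _ = secondary_name_matches_py_alt removed added
  unfold secondary_name_matches_py secondary_name_matches_py_alt
  apply PySem.List.foldl_congr_mem
  intro out r _
  by_cases h : pvNorm r == ""
  · rw [if_pos h, if_pos h]
  · rw [if_neg h, if_neg h]
    exact pvInner_eq added r out h
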